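-- pv_equiv track=rewrite | github.com/Abhi-Bagai/Advent-of-code-2025 | Day 9/Puzzle 2/day_nine_p_two_ranges2.py | grid_border
-- ===== SOURCE A (Python) =====
-- def grid_border(border_coordinates, size, minimum):
--     grid = []
--     for y in range(minimum, size):
--         row = []
--         for x in range(minimum, size):
--             point = '.'
--             if (x, y) in border_coordinates:
--                 point = '*'
--             row += point
--         grid.append(row)
--     return grid
-- ===== SOURCE B (Python) =====
-- def grid_border(border_coordinates, size, minimum):
--     grid = [['.' for _ in range(minimum, size)] for _ in range(minimum, size)]
--     for x, y in border_coordinates: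
--         if minimum <= x < size and minimum <= y < size:
--             grid[y - minimum][x - minimum] = '*'
--     return grid
-- ===== Notes on version B (the rewrite author's own statement) =====
-- stated objective: alternative
-- what changed: Instead of scanning every grid cell and testing list membership per cell, B builds the all-dots grid once and scatters '*' over the (in-range) border coordinates.
import Mathlib
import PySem

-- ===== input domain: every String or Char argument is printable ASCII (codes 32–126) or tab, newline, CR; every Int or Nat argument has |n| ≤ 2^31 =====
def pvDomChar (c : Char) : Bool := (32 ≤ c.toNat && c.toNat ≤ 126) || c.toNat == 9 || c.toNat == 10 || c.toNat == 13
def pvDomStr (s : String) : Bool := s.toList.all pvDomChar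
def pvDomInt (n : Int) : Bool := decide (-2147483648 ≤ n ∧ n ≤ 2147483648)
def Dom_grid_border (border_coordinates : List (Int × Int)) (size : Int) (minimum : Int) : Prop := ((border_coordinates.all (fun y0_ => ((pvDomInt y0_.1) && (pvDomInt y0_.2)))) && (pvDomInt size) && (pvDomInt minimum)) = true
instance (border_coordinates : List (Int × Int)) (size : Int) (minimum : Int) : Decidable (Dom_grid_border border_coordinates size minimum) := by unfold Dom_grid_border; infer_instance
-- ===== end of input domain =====

-- B builds the all-dots grid once and scatters '*' over the border coordinates instead of
-- scanning every cell and testing list membership per cell (objective: alternative).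

-- ===== PORT A =====
-- literal transliteration: for each y, build a row by appending '.' or '*' per x, append row to grid
def grid_border (border_coordinates : List (Int × Int)) (size : Int) (minimum : Int) : List (List String) :=
  (PySem.List.pyRange minimum size 1).foldl (fun grid y =>
    grid ++ [(PySem.List.pyRange minimum size 1).foldl (fun row x =>
      let point : String := if (x, y) ∈ border_coordinates then "*" else "."
      row ++ [point]) []]) []

-- ===== PORT B =====
-- literal transliteration of Source B: all-dots grid comprehension, then scatter in-range points
def grid_border_alt (border_coordinates : List (Int × Int)) (size : Int) (minimum : Int) : List (List String) :=
  let grid := (PySem.List.pyRange minimum size 1).map (fun _ =>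
    (PySem.List.pyRange minimum size 1).map (fun _ => "."))
  border_coordinates.foldl (fun g p =>
    if minimum ≤ p.1 ∧ p.1 < size ∧ minimum ≤ p.2 ∧ p.2 < size then
      g.modify (p.2 - minimum).toNat (fun row => row.set (p.1 - minimum).toNat "*")
    else g) grid

-- ===== PRECONDITION & SPEC =====
def Spec_grid_border (border_coordinates : List (Int × Int)) (size : Int) (minimum : Int) (out : List (List String)) : Prop := out = grid_border_alt border_coordinates size minimum
instance (border_coordinates : List (Int × Int)) (size : Int) (minimum : Int) (out : List (List String)) : Decidable (Spec_grid_border border_coordinates size minimum out) := by unfold Spec_grid_border; infer_instance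

-- ===== CLAIM (what is proved, stated in full; the proofs are below) =====
def Claim_equal_grid_border : Prop := ∀ (border_coordinates : List (Int × Int)) (size : Int) (minimum : Int), Dom_grid_border border_coordinates size minimum → Spec_grid_border border_coordinates size minimum (grid_border border_coordinates size minimum)

-- ===== LEMMAS AND PROOFS =====

-- setting index i of a mapped range pushes the update pointwise (no bound needed: out-of-range set is a no-op)
theorem pv_map_range_set {α : Type} (n i : Nat) (f : Nat → α) (a : α) :
    ((List.range n).map f).set i a = (List.range n).map (fun (r : Nat) => if i = r then a else f r) := by
  apply List.ext_getElem
  · simp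
  · intro j h1 h2
    simp [List.getElem_set]

-- modifying row r0 of the rectangular grid by setting column c0 to "*" is a pointwise update
theorem pv_grid_modify (n r0 c0 : Nat) (g : Nat → Nat → String) :
    ((List.range n).map (fun (r : Nat) => (List.range n).map (fun (c : Nat) => g r c))).modify r0
        (fun row => row.set c0 "*")
      = (List.range n).map (fun (r : Nat) => (List.range n).map (fun (c : Nat) =>
          if r0 = r ∧ c0 = c then "*" else g r c)) := by
  apply List.ext_getElem
  · simp
  · intro j h1 h2
    simp only [List.getElem_modify, List.getElem_map, List.getElem_range]
    by_cases h : r0 = j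
    · subst h
      simp [pv_map_range_set]
    · simp [h]

-- the scatter loop of B, started on any rectangular grid described by g, marks exactly the
-- in-range coordinates of the list
theorem pv_mark_fold (size minimum : Int) (coords : List (Int × Int)) (g : Nat → Nat → String) :
    coords.foldl (fun grid p =>
        if minimum ≤ p.1 ∧ p.1 < size ∧ minimum ≤ p.2 ∧ p.2 < size then
          grid.modify (p.2 - minimum).toNat (fun row => row.set (p.1 - minimum).toNat "*")
        else grid)
      ((List.range (size - minimum).toNat).map (fun (r : Nat) =>
        (List.range (size - minimum).toNat).map (fun (c : Nat) => g r c)))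
    = (List.range (size - minimum).toNat).map (fun (r : Nat) =>
        (List.range (size - minimum).toNat).map (fun (c : Nat) =>
          if (minimum + (c : Int), minimum + (r : Int)) ∈ coords then "*" else g r c)) := by
  induction coords generalizing g with
  | nil => simp
  | cons p rest ih =>
    simp only [List.foldl_cons]
    by_cases hp : minimum ≤ p.1 ∧ p.1 < size ∧ minimum ≤ p.2 ∧ p.2 < size
    · rw [if_pos hp, pv_grid_modify, ih]
      apply List.map_congr_left
      intro r hr
      apply List.map_congr_left
      intro c hc
      simp only [List.mem_range] at hr hc
      have hkey : (minimum + (c : Int), minimum + (r : Int)) = p ↔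
          ((p.2 - minimum).toNat = r ∧ (p.1 - minimum).toNat = c) := by
        constructor
        · intro he
          have h1 : minimum + (c : Int) = p.1 := congrArg Prod.fst he
          have h2 : minimum + (r : Int) = p.2 := congrArg Prod.snd he
          omega
        · intro ⟨h1, h2⟩
          have : p.1 = minimum + (c : Int) ∧ p.2 = minimum + (r : Int) := by omega
          rw [Prod.ext_iff]
          exact ⟨this.1.symm, this.2.symm⟩
      by_cases hm : (minimum + (c : Int), minimum + (r : Int)) ∈ rest
      · simp [hm]
      · simp [hm, List.mem_cons, hkey]
    · rw [if_neg hp, ih]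
      apply List.map_congr_left
      intro r hr
      apply List.map_congr_left
      intro c hc
      simp only [List.mem_range] at hr hc
      have hne : (minimum + (c : Int), minimum + (r : Int)) ≠ p := by
        intro he
        have h1 : minimum + (c : Int) = p.1 := congrArg Prod.fst he
        have h2 : minimum + (r : Int) = p.2 := congrArg Prod.snd he
        omega
      simp [List.mem_cons, hne]

-- A's nested append-fold is the nested map over the ranges
theorem pv_gridA (coords : List (Int × Int)) (size minimum : Int) :
    grid_border coords size minimum
    = (List.range (size - minimum).toNat).map (fun (r : Nat) =>
        (List.range (size - minimum).toNat).map (fun (c : Nat) =>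
          if (minimum + (c : Int), minimum + (r : Int)) ∈ coords then "*" else ".")) := by
  unfold grid_border
  simp only [PySem.List.foldl_append_singleton_eq_map, List.nil_append,
    PySem.List.pyRange_one, List.map_map]
  rfl

-- ===== VERDICT (by name: the statement is the Claim_ definition above) =====
theorem grid_border_spec : Claim_equal_grid_border := by
  intro coords size minimum _
  show grid_border coords size minimum = grid_border_alt coords size minimum
  rw [pv_gridA]
  unfold grid_border_alt
  simp only [PySem.List.pyRange_one, List.map_map]
  exact (pv_mark_fold size minimum coords (fun _ _ => ".")).symm
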